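-- pv_equiv track=rewrite | github.com/xBlanco/Pr-ctica-1-Cripto | Ex3.py | decrypt_vigenere_preserve_format
-- ===== SOURCE A (Python) =====
-- def decrypt_vigenere_preserve_format(text_original, key):
--     decrypted = ''
--     key_len = len(key)
--     idx = 0  # índice para la clave
--     for char in text_original:
--         if char.isalpha():
--             shift = ord(key[idx % key_len]) - ord('a')
--             decrypted += chr((ord(char.lower()) - shift - ord('a')) % 26 + ord('a'))
--             idx += 1
--         else:
--             decrypted += char  # conservamos espacios y saltos de línea
--     return decrypted
-- ===== SOURCE B (Python) =====
-- def decrypt_vigenere_preserve_format(text_original, key):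
--     key_len = len(key)
--     # pass 1: decrypt the alphabetic characters only
--     letters = []
--     count = 0
--     for ch in text_original:
--         if ch.isalpha():
--             shift = ord(key[count % key_len]) - ord('a')
--             letters.append(chr((ord(ch.lower()) - shift - ord('a')) % 26 + ord('a')))
--             count += 1
--     # pass 2: reassemble, interleaving decrypted letters with the original non-letters
--     it = iter(letters)
--     return ''.join(next(it) if ch.isalpha() else ch for ch in text_original)
-- ===== Notes on version B (the rewrite author's own statement) =====
-- stated objective: alternative
-- what changed: Split A's single interleaved loop into two phases: a first pass that decrypts only the alphabetic characters into a list, and a second pass that reassembles the output by consuming that list where the original has letters and copying non-letters verbatim.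
import Mathlib
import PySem

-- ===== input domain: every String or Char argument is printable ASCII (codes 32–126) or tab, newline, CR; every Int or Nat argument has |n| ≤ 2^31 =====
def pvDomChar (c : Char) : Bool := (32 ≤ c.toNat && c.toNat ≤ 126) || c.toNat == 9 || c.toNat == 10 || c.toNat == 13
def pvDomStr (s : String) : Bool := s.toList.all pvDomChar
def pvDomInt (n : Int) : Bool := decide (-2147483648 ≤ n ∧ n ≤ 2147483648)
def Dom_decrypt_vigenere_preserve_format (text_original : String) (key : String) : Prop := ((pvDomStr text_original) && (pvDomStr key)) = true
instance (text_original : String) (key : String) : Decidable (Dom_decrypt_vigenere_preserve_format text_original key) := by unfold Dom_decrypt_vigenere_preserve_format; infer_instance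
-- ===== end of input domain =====

-- B replaces A's single interleaved loop by two phases (decrypt letters, then reassemble); same return value, no speed claim.


-- ===== PORT A =====
-- A's loop: one pass, accumulating the output string and the key index idx.
-- key.getD (idx % key.length) 'a' totalizes key[idx % key_len]; when key = "" Python raises
-- ZeroDivisionError there, which Pre_ excludes, so the default is never the value used.
def pvALoop (key : List Char) : List Char → List Char → Nat → List Char
  | [], decrypted, _ => decrypted
  | c :: rest, decrypted, idx =>
    if PySem.Chars.isalpha c then
      let shift : Int := ((key.getD (idx % key.length) 'a').toNat : Int) - 97
      pvALoop key rest
        (decrypted ++ [Char.ofNat ((PySem.Int.mod (((PySem.Chars.lowerChar c).toNat : Int) - shift - 97) 26 + 97).toNat)])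
        (idx + 1)
    else
      pvALoop key rest (decrypted ++ [c]) idx

def decrypt_vigenere_preserve_format (text_original : String) (key : String) : String :=
  String.mk (pvALoop key.toList text_original.toList [] 0)

-- ===== PORT B =====
-- pass 1: decrypt only the alphabetic characters (count advances per letter)
def pvBLetters (key : List Char) : List Char → Nat → List Char
  | [], _ => []
  | c :: rest, count =>
    if PySem.Chars.isalpha c then
      let shift : Int := ((key.getD (count % key.length) 'a').toNat : Int) - 97
      Char.ofNat ((PySem.Int.mod (((PySem.Chars.lowerChar c).toNat : Int) - shift - 97) 26 + 97).toNat)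
        :: pvBLetters key rest (count + 1)
    else
      pvBLetters key rest count

-- pass 2: reassemble: take the next decrypted letter where the original has a letter
-- (the [] letter case is unreachable: pass 1 yields one letter per alphabetic char)
def pvBMerge : List Char → List Char → List Char
  | [], _ => []
  | c :: rest, ls =>
    if PySem.Chars.isalpha c then
      match ls with
      | l :: ls' => l :: pvBMerge rest ls'
      | [] => pvBMerge rest []
    else
      c :: pvBMerge rest ls

def decrypt_vigenere_preserve_format_alt (text_original : String) (key : String) : String :=
  String.mk (pvBMerge text_original.toList (pvBLetters key.toList text_original.toList 0))

-- ===== PRECONDITION & SPEC =====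
-- Pre_ excludes exactly the inputs where Python A raises ZeroDivisionError: an empty key
-- together with a text containing at least one alphabetic character (B raises there too).
def Pre_decrypt_vigenere_preserve_format (text_original : String) (key : String) : Prop :=
  (text_original.toList.any (fun c => PySem.Chars.isalpha c) = true) → key ≠ ""
instance (text_original : String) (key : String) : Decidable (Pre_decrypt_vigenere_preserve_format text_original key) := by
  unfold Pre_decrypt_vigenere_preserve_format; infer_instance

def pvWitness_decrypt_vigenere_preserve_format : String × String := ("Lipps, Asvph!\n", "dog")

def Spec_decrypt_vigenere_preserve_format (text_original : String) (key : String) (out : String) : Prop := out = decrypt_vigenere_preserve_format_alt text_original key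
instance (text_original : String) (key : String) (out : String) : Decidable (Spec_decrypt_vigenere_preserve_format text_original key out) := by unfold Spec_decrypt_vigenere_preserve_format; infer_instance

-- ===== CLAIM (what is proved, stated in full; the proofs are below) =====
def Claim_equal_decrypt_vigenere_preserve_format : Prop := ∀ (text_original : String) (key : String), Dom_decrypt_vigenere_preserve_format text_original key → Pre_decrypt_vigenere_preserve_format text_original key → Spec_decrypt_vigenere_preserve_format text_original key (decrypt_vigenere_preserve_format text_original key)

-- ===== LEMMAS AND PROOFS =====
-- A's single loop equals B's two phases, for any accumulator and any starting key index.
theorem pvLoop_eq (key : List Char) :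
    ∀ (text acc : List Char) (idx : Nat),
      pvALoop key text acc idx = acc ++ pvBMerge text (pvBLetters key text idx) := by
  intro text
  induction text with
  | nil => intro acc idx; simp [pvALoop, pvBMerge]
  | cons c rest ih =>
    intro acc idx
    by_cases h : PySem.Chars.isalpha c = true
    · simp [pvALoop, pvBLetters, pvBMerge, h, ih]
    · simp [pvALoop, pvBLetters, pvBMerge, h, ih]

-- ===== VERDICT (by name: the statement is the Claim_ definition above) =====
theorem decrypt_vigenere_preserve_format_spec : Claim_equal_decrypt_vigenere_preserve_format := by
  intro text_original key _ _
  unfold Spec_decrypt_vigenere_preserve_format decrypt_vigenere_preserve_format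
    decrypt_vigenere_preserve_format_alt
  rw [pvLoop_eq]
  simp
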